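-- pv_equiv track=rewrite | github.com/KingOfRaccoon/python | 13.py | count
-- ===== SOURCE A (Python) =====
-- def count(data=[]):
--     counter = 0
--     for i in data:
--         if i % 2 == 0:
--             counter += 1
--         else:
--             counter -= 1
--     return counter
-- ===== SOURCE B (Python) =====
-- def count(data=[]):
--     xs = list(data)
--
--     def go(lo, hi):
--         if hi - lo == 0:
--             return 0
--         if hi - lo == 1:
--             return 1 if xs[lo] % 2 == 0 else -1
--         mid = (lo + hi) // 2
--         return go(lo, mid) + go(mid, hi)
--
--     return go(0, len(xs))
-- ===== Notes on version B (the rewrite author's own statement) =====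
-- stated objective: alternative
-- what changed: Replaces the single left-to-right +1/-1 accumulator loop with a recursive divide-and-conquer over index ranges that splits the list in half and sums the two halves' scores.
import Mathlib
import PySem

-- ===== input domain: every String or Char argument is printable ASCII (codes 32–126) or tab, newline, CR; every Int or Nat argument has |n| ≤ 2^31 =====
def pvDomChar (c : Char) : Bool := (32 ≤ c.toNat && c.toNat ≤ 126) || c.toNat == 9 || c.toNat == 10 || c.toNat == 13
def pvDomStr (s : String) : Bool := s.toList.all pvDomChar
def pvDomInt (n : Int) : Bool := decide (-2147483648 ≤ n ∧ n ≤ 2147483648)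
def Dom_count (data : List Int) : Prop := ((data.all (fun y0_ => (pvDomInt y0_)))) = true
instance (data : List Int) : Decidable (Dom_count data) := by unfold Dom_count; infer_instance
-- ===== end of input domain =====

-- B replaces A's single left-to-right +1/-1 accumulator loop with divide-and-conquer over index ranges (alternative decomposition; same cost).


-- ===== PORT A =====
-- for i in data: counter += 1 if i % 2 == 0 else counter -= 1
def count (data : List Int) : Int :=
  data.foldl (fun counter i => if PySem.Int.mod i 2 = 0 then counter + 1 else counter - 1) 0

-- ===== PORT B =====
-- go(lo, hi): score of xs[lo:hi] by splitting at mid = (lo+hi)//2.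
-- Indices are Nats mirroring Python's always-nonnegative lo/hi; xs[lo] (always in range,
-- since lo < hi ≤ len(xs)) is ported as xs.getD lo 0, exact on in-range indices.
def goB (xs : List Int) (lo hi : Nat) : Int :=
  if hi - lo = 0 then 0
  else if hi - lo = 1 then (if PySem.Int.mod (xs.getD lo 0) 2 = 0 then 1 else -1)
  else
    let mid := (lo + hi) / 2
    goB xs lo mid + goB xs mid hi
termination_by hi - lo
decreasing_by all_goals omega

def count_alt (data : List Int) : Int := goB data 0 data.length

-- ===== PRECONDITION & SPEC =====
def Spec_count (data : List Int) (out : Int) : Prop := out = count_alt data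
instance (data : List Int) (out : Int) : Decidable (Spec_count data out) := by unfold Spec_count; infer_instance

-- ===== CLAIM (what is proved, stated in full; the proofs are below) =====
def Claim_equal_count : Prop := ∀ (data : List Int), Dom_count data → Spec_count data (count data)

-- ===== LEMMAS AND PROOFS =====
theorem count_shift (l : List Int) (c : Int) :
    l.foldl (fun counter i => if PySem.Int.mod i 2 = 0 then counter + 1 else counter - 1) c
      = c + l.foldl (fun counter i => if PySem.Int.mod i 2 = 0 then counter + 1 else counter - 1) 0 := by
  induction l generalizing c with
  | nil => simp
  | cons x xs ih =>
    simp only [List.foldl_cons]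
    rw [ih, ih (if PySem.Int.mod x 2 = 0 then (0:Int) + 1 else 0 - 1)]
    split_ifs <;> ring

theorem count_append (l₁ l₂ : List Int) :
    count (l₁ ++ l₂) = count l₁ + count l₂ := by
  unfold count
  rw [List.foldl_append, count_shift]

theorem goB_eq (xs : List Int) (n lo hi : Nat) (hn : hi - lo = n) (hhi : hi ≤ xs.length) :
    goB xs lo hi = count ((xs.drop lo).take (hi - lo)) := by
  induction n using Nat.strong_induction_on generalizing lo hi with
  | _ n ih =>
    rw [goB]
    by_cases h0 : hi - lo = 0
    · simp [h0, count]
    · by_cases h1 : hi - lo = 1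
      · have hlt : lo < xs.length := by omega
        have hdrop : xs.drop lo = xs[lo] :: xs.drop (lo + 1) :=
          List.drop_eq_getElem_cons hlt
        rw [if_neg h0, if_pos h1, h1, hdrop]
        simp only [List.take_succ_cons, List.take_zero, count, List.foldl_cons, List.foldl_nil,
          List.getD_eq_getElem xs 0 hlt]
        split_ifs <;> norm_num
      · simp only [h0, h1, if_false]
        have hmidlo : (lo + hi) / 2 - lo < n := by omega
        have hhilo : hi - (lo + hi) / 2 < n := by omega
        rw [ih _ hmidlo _ _ rfl (by omega), ih _ hhilo _ _ rfl hhi]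
        have hsplit : (xs.drop lo).take (hi - lo)
            = (xs.drop lo).take ((lo + hi) / 2 - lo)
              ++ (xs.drop ((lo + hi) / 2)).take (hi - (lo + hi) / 2) := by
          have h2 : hi - lo = ((lo + hi) / 2 - lo) + (hi - (lo + hi) / 2) := by omega
          rw [h2, List.take_add, List.drop_drop,
            show lo + ((lo + hi) / 2 - lo) = (lo + hi) / 2 from by omega]
        rw [hsplit, count_append]

-- ===== VERDICT (by name: the statement is the Claim_ definition above) =====
theorem count_spec : Claim_equal_count := by
  intro data _
  unfold Spec_count count_alt
  rw [goB_eq data (data.length - 0) 0 data.length rfl (le_refl _)]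
  simp
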